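-- pv_equiv track=rewrite | github.com/rwxayheee/Meeko | meeko/preparation.py | adapt_pdbqt_for_autodock4_flexres
-- ===== SOURCE A (Python) =====
-- def adapt_pdbqt_for_autodock4_flexres(pdbqt_string, res, chain, num):
--     """ adapt pdbqt_string to be compatible with AutoDock4 requirements:
--          - first and second atoms named CA and CB
--          - write BEGIN_RES / END_RES
--          - remove TORSDOF
--         this is for covalent docking (tethered)
--     """
--     new_string = "BEGIN_RES %s %s %s\n" % (res, chain, num)
--     atom_number = 0
--     for line in pdbqt_string.split("\n"):
--         if line == "":
--             continue
--         if line.startswith("TORSDOF"):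
--             continue
--         if line.startswith("ATOM"):
--             atom_number+=1
--             if atom_number == 1:
--                 line = line[:13] + 'CA' + line[15:]
--             elif atom_number == 2:
--                 line = line[:13] + 'CB' + line[15:]
--             new_string += line + '\n'
--             continue
--         new_string += line + '\n'
--     new_string += "END_RES %s %s %s\n" % (res, chain, num)
--     return new_string
-- ===== SOURCE B (Python) =====
-- def adapt_pdbqt_for_autodock4_flexres(pdbqt_string, res, chain, num):
--     """Rewrite pdbqt_string for AD4 flexres: rename first two atoms to CA/CB,
--     wrap in BEGIN_RES/END_RES, drop TORSDOF lines (separate passes, not one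
--     interleaved counter loop)."""
--     lines = [l for l in pdbqt_string.split("\n")
--              if l != "" and not l.startswith("TORSDOF")]
--     atom_idxs = [i for i, l in enumerate(lines) if l.startswith("ATOM")]
--     for name, i in zip(["CA", "CB"], atom_idxs):
--         lines[i] = lines[i][:13] + name + lines[i][15:]
--     body = "".join(l + "\n" for l in lines)
--     return ("BEGIN_RES %s %s %s\n" % (res, chain, num)
--             + body
--             + "END_RES %s %s %s\n" % (res, chain, num))
-- ===== Notes on version B (the rewrite author's own statement) =====
-- stated objective: simpler
-- what changed: Replaces the single interleaved filter-and-count loop with an accumulated string by separate passes: a filtering comprehension, an index scan for ATOM lines, targeted patching of the first two, and one join.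
import Mathlib
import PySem

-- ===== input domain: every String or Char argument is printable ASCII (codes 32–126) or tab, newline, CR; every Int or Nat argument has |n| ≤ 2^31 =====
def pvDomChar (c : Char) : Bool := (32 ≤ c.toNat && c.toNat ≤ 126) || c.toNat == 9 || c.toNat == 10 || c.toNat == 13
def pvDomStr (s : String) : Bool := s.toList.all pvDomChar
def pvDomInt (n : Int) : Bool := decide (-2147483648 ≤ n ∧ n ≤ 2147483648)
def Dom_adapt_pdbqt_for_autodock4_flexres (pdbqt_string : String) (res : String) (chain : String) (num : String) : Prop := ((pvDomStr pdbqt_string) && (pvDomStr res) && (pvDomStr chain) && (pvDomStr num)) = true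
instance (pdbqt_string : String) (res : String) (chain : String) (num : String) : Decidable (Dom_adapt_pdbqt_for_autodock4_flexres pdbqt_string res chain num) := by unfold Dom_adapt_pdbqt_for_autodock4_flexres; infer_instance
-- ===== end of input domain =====

-- B replaces A's single interleaved counter loop by separate passes (filter, locate ATOM indices,
-- patch the first two, join); objective: simpler decomposition, same O(n) cost.

-- ===== PORT A =====
-- shared primitives of both Pythons: s.split("\n") and the slice patch l[:13] + name + l[15:]
def pvSplitNL (s : String) : List String := (PySem.Str.split? s "\n").getD []

def pvPatch13 (line name : String) : String :=
  PySem.Str.slice line none (some 13) ++ name ++ PySem.Str.slice line (some 15) none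

def adapt_pdbqt_for_autodock4_flexres (pdbqt_string : String) (res : String) (chain : String) (num : String) : String :=
  let new_string := "BEGIN_RES " ++ res ++ " " ++ chain ++ " " ++ num ++ "\n"
  let st := (pvSplitNL pdbqt_string).foldl
    (fun (st : Nat × String) line =>
      if line = "" then st
      else if PySem.Str.startswith line "TORSDOF" then st
      else if PySem.Str.startswith line "ATOM" then
        let atom_number := st.1 + 1
        let line :=
          if atom_number = 1 then pvPatch13 line "CA"
          else if atom_number = 2 then pvPatch13 line "CB"
          else line
        (atom_number, st.2 ++ (line ++ "\n"))
      else (st.1, st.2 ++ (line ++ "\n")))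
    (0, new_string)
  st.2 ++ ("END_RES " ++ res ++ " " ++ chain ++ " " ++ num ++ "\n")

-- ===== PORT B =====
def adapt_pdbqt_for_autodock4_flexres_alt (pdbqt_string : String) (res : String) (chain : String) (num : String) : String :=
  let lines := (pvSplitNL pdbqt_string).filter
    (fun l => !(l == "") && !(PySem.Str.startswith l "TORSDOF"))
  let atom_idxs := (PySem.List.enumerate lines 0).filterMap
    (fun p => if PySem.Str.startswith p.2 "ATOM" then some p.1 else none)
  -- indices from enumerate are ≥ 0, so `.toNat` is exact here
  let lines := (List.zip ["CA", "CB"] atom_idxs).foldl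
    (fun ls p => ls.set p.2.toNat (pvPatch13 (ls.getD p.2.toNat "") p.1)) lines
  let body := PySem.Str.join "" (lines.map (· ++ "\n"))
  "BEGIN_RES " ++ res ++ " " ++ chain ++ " " ++ num ++ "\n"
    ++ body
    ++ ("END_RES " ++ res ++ " " ++ chain ++ " " ++ num ++ "\n")

-- ===== PRECONDITION & SPEC =====
def Spec_adapt_pdbqt_for_autodock4_flexres (pdbqt_string : String) (res : String) (chain : String) (num : String) (out : String) : Prop := out = adapt_pdbqt_for_autodock4_flexres_alt pdbqt_string res chain num
instance (pdbqt_string : String) (res : String) (chain : String) (num : String) (out : String) : Decidable (Spec_adapt_pdbqt_for_autodock4_flexres pdbqt_string res chain num out) := by unfold Spec_adapt_pdbqt_for_autodock4_flexres; infer_instance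

-- ===== CLAIM (what is proved, stated in full; the proofs are below) =====
def Claim_equal_adapt_pdbqt_for_autodock4_flexres : Prop := ∀ (pdbqt_string : String) (res : String) (chain : String) (num : String), Dom_adapt_pdbqt_for_autodock4_flexres pdbqt_string res chain num → Spec_adapt_pdbqt_for_autodock4_flexres pdbqt_string res chain num (adapt_pdbqt_for_autodock4_flexres pdbqt_string res chain num)

-- ===== LEMMAS AND PROOFS =====

/-- which lines are kept (neither empty nor `TORSDOF…`) -/
def pvKeep (l : String) : Bool := !(l == "") && !(PySem.Str.startswith l "TORSDOF")

/-- which lines are ATOM lines -/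
def pvAtom (l : String) : Bool := PySem.Str.startswith l "ATOM"

/-- A's loop body, with the two skip-ifs collapsed into pvKeep -/
def pvStep (st : Nat × String) (line : String) : Nat × String :=
  if pvKeep line then
    if pvAtom line then
      (st.1 + 1, st.2 ++ ((if st.1 + 1 = 1 then pvPatch13 line "CA"
        else if st.1 + 1 = 2 then pvPatch13 line "CB" else line) ++ "\n"))
    else (st.1, st.2 ++ (line ++ "\n"))
  else st

theorem pvStep_eq :
    (fun (st : Nat × String) line =>
      if line = "" then st
      else if PySem.Str.startswith line "TORSDOF" then st
      else if PySem.Str.startswith line "ATOM" then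
        let atom_number := st.1 + 1
        let line :=
          if atom_number = 1 then pvPatch13 line "CA"
          else if atom_number = 2 then pvPatch13 line "CB"
          else line
        (atom_number, st.2 ++ (line ++ "\n"))
      else (st.1, st.2 ++ (line ++ "\n"))) = pvStep := by
  funext st line
  simp only [pvStep, pvKeep, pvAtom]
  split_ifs <;> simp_all

/-- the body A's loop accumulates, starting with `n` atoms already seen -/
def pvRender (n : Nat) : List String → String
  | [] => ""
  | l :: ls =>
    if pvKeep l then
      if pvAtom l then
        (if n + 1 = 1 then pvPatch13 l "CA"
         else if n + 1 = 2 then pvPatch13 l "CB" else l) ++ "\n" ++ pvRender (n + 1) ls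
      else l ++ "\n" ++ pvRender n ls
    else pvRender n ls

/-- result of B's patch loop: consume one name per ATOM line -/
def pvPatchR : List String → List String → List String
  | _, [] => []
  | [], l :: ls => l :: ls
  | nm :: names, l :: ls =>
    if pvAtom l then pvPatch13 l nm :: pvPatchR names ls
    else l :: pvPatchR (nm :: names) ls

/-- positions of ATOM lines -/
def pvIdxs : List String → List Nat
  | [] => []
  | l :: ls => if pvAtom l then 0 :: (pvIdxs ls).map (· + 1) else (pvIdxs ls).map (· + 1)

/-- names left after `n` atoms -/
def pvNames : Nat → List String
  | 0 => ["CA", "CB"]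
  | 1 => ["CB"]
  | _ => []

theorem pvPatchR_nil (ls : List String) : pvPatchR [] ls = ls := by
  cases ls <;> rfl

theorem pvJoin_nil : PySem.Str.join "" ([] : List String) = "" := by decide

theorem pvJoin_cons (x : String) (xs : List String) :
    PySem.Str.join "" (x :: xs) = x ++ PySem.Str.join "" xs := by
  apply String.ext
  cases xs with
  | nil => simp [PySem.Str.toList_join, PySem.Chars.join_singleton, PySem.Chars.join_nil]
  | cons y ys => simp [PySem.Str.toList_join, PySem.Chars.join_cons_cons]

theorem pvFoldA (ls : List String) : ∀ (n : Nat) (acc : String),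
    ls.foldl pvStep (n, acc)
    = (n + (ls.filter (fun l => pvKeep l && pvAtom l)).length, acc ++ pvRender n ls) := by
  induction ls with
  | nil => intro n acc; simp [pvRender]
  | cons l ls ih =>
    intro n acc
    rw [List.foldl_cons, List.filter_cons]
    by_cases hk : pvKeep l = true
    · by_cases ha : pvAtom l = true
      · simp only [pvStep, hk, ha, if_true, ih, pvRender, Bool.and_self, List.length_cons,
          Prod.mk.injEq]
        exact ⟨by omega, by simp [String.append_assoc]⟩
      · have ha' : pvAtom l = false := by simpa using ha
        simp only [pvStep, hk, ha', if_true, Bool.false_eq_true, if_false, ih, pvRender,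
          Bool.and_false]
        simp [String.append_assoc]
    · have hk' : pvKeep l = false := by simpa using hk
      simp only [pvStep, hk', Bool.false_eq_true, if_false, ih, pvRender, Bool.false_and]

theorem pvRender_filter (ls : List String) : ∀ n,
    pvRender n (ls.filter pvKeep) = pvRender n ls := by
  induction ls with
  | nil => intro n; rfl
  | cons l ls ih =>
    intro n
    by_cases h : pvKeep l = true
    · simp only [List.filter_cons, h, if_true, pvRender, ih]
    · have h' : pvKeep l = false := by simpa using h
      simp only [List.filter_cons, h', Bool.false_eq_true, if_false, pvRender, ih]

theorem pvEnumIdxs (ls : List String) : ∀ (s : Nat),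
    (PySem.List.enumerate ls (s : Int)).filterMap
      (fun p => if PySem.Str.startswith p.2 "ATOM" then some p.1 else none)
    = (pvIdxs ls).map (fun k => ((k + s : Nat) : Int)) := by
  induction ls with
  | nil => intro s; simp [PySem.List.enumerate_nil, pvIdxs]
  | cons l ls ih =>
    intro s
    have hcast : ((s : Int) + 1) = ((s + 1 : Nat) : Int) := by push_cast; ring
    rw [PySem.List.enumerate_cons, List.filterMap_cons, hcast, ih (s + 1)]
    by_cases h : pvAtom l = true
    · have h' : PySem.Str.startswith l "ATOM" = true := h
      simp only [h', if_true, pvIdxs, h, List.map_cons, List.map_map]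
      congr 1
      · push_cast; ring
      · exact List.map_congr_left (fun k _ => by simp [Function.comp]; ring)
    · have h' : PySem.Str.startswith l "ATOM" = false := by simpa [pvAtom] using h
      have h'' : pvAtom l = false := h'
      simp only [h', Bool.false_eq_true, if_false, pvIdxs, h'', List.map_map]
      exact List.map_congr_left (fun k _ => by simp [Function.comp]; ring)

theorem pvShift (names : List String) : ∀ (ks : List Nat) (x : String) (ls : List String),
    (List.zip names (ks.map (fun k => ((k + 1 : Nat) : Int)))).foldl
      (fun ls p => ls.set p.2.toNat (pvPatch13 (ls.getD p.2.toNat "") p.1)) (x :: ls)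
    = x :: (List.zip names (ks.map (fun k => ((k : Nat) : Int)))).foldl
      (fun ls p => ls.set p.2.toNat (pvPatch13 (ls.getD p.2.toNat "") p.1)) ls := by
  induction names with
  | nil => intro ks x ls; simp
  | cons nm names ih =>
    intro ks x ls
    cases ks with
    | nil => simp
    | cons k ks =>
      simp only [List.map_cons, List.zip_cons_cons, List.foldl_cons, Int.toNat_natCast,
        List.getD_cons_succ, List.set_cons_succ, ih ks]

theorem pvSetFold (ls : List String) : ∀ (names : List String),
    (List.zip names ((pvIdxs ls).map (fun k => ((k : Nat) : Int)))).foldl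
      (fun ls p => ls.set p.2.toNat (pvPatch13 (ls.getD p.2.toNat "") p.1)) ls
    = pvPatchR names ls := by
  induction ls with
  | nil => intro names; simp [pvIdxs, pvPatchR]
  | cons l ls ih =>
    intro names
    cases names with
    | nil => simp [pvPatchR_nil]
    | cons nm names =>
      by_cases h : pvAtom l = true
      · rw [show pvIdxs (l :: ls) = 0 :: (pvIdxs ls).map (· + 1) from by rw [pvIdxs, if_pos h]]
        rw [show pvPatchR (nm :: names) (l :: ls) = pvPatch13 l nm :: pvPatchR names ls from by
          rw [pvPatchR, if_pos h]]
        simp only [List.map_cons, List.map_map, Nat.cast_zero, List.zip_cons_cons,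
          List.foldl_cons, Int.toNat_zero, List.set_cons_zero, List.getD_cons_zero,
          Function.comp_def]
        rw [pvShift names (pvIdxs ls) (pvPatch13 l nm) ls, ih names]
      · have h' : pvAtom l = false := by simpa using h
        rw [show pvIdxs (l :: ls) = (pvIdxs ls).map (· + 1) from by
          rw [pvIdxs, if_neg (by simp [h'])]]
        rw [show pvPatchR (nm :: names) (l :: ls) = l :: pvPatchR (nm :: names) ls from by
          rw [pvPatchR, if_neg (by simp [h'])]]
        simp only [List.map_map, Function.comp_def]
        rw [pvShift (nm :: names) (pvIdxs ls) l ls, ih (nm :: names)]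

theorem pvJoinRender (ls : List String) : ∀ (n : Nat), (∀ l ∈ ls, pvKeep l = true) →
    PySem.Str.join "" ((pvPatchR (pvNames n) ls).map (· ++ "\n")) = pvRender n ls := by
  induction ls with
  | nil => intro n _; simp [pvPatchR, pvRender, pvJoin_nil]
  | cons l ls ih =>
    intro n hk
    have hkl : pvKeep l = true := hk l (by simp)
    have hks : ∀ x ∈ ls, pvKeep x = true := fun x hx => hk x (by simp [hx])
    by_cases h : pvAtom l = true
    · have key : pvPatchR (pvNames n) (l :: ls)
          = (if n + 1 = 1 then pvPatch13 l "CA" else if n + 1 = 2 then pvPatch13 l "CB" else l)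
            :: pvPatchR (pvNames (n + 1)) ls := by
        rcases n with _ | _ | m
        · simp [pvNames, pvPatchR, h]
        · simp [pvNames, pvPatchR, h]
        · simp only [pvNames, pvPatchR_nil]
          rw [if_neg (by omega), if_neg (by omega)]
      have hrender : pvRender n (l :: ls)
          = (if n + 1 = 1 then pvPatch13 l "CA" else if n + 1 = 2 then pvPatch13 l "CB" else l)
            ++ "\n" ++ pvRender (n + 1) ls := by
        simp only [pvRender, hkl, h, if_true]
      rw [hrender, key, List.map_cons, pvJoin_cons, ih (n + 1) hks]
    · have h' : pvAtom l = false := by simpa using h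
      have step : ∀ names, pvPatchR names (l :: ls) = l :: pvPatchR names ls := by
        intro names
        cases names with
        | nil => simp [pvPatchR_nil]
        | cons nm names => simp [pvPatchR, h']
      rw [step, List.map_cons, pvJoin_cons, ih n hks]
      simp only [pvRender, hkl, h', if_true, Bool.false_eq_true, if_false,
        String.append_assoc]

-- ===== VERDICT (by name: the statement is the Claim_ definition above) =====
theorem adapt_pdbqt_for_autodock4_flexres_spec : Claim_equal_adapt_pdbqt_for_autodock4_flexres := by
  intro pdbqt_string res chain num _
  unfold Spec_adapt_pdbqt_for_autodock4_flexres
  unfold adapt_pdbqt_for_autodock4_flexres adapt_pdbqt_for_autodock4_flexres_alt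
  simp only [pvStep_eq]
  rw [pvFoldA (pvSplitNL pdbqt_string) 0]
  have hfilter : (pvSplitNL pdbqt_string).filter
      (fun l => !(l == "") && !(PySem.Str.startswith l "TORSDOF"))
      = (pvSplitNL pdbqt_string).filter pvKeep := rfl
  rw [hfilter]
  rw [show ((0 : Int)) = ((0 : Nat) : Int) from rfl, pvEnumIdxs]
  simp only [Nat.add_zero]
  rw [pvSetFold]
  rw [show ["CA", "CB"] = pvNames 0 from rfl]
  rw [pvJoinRender _ 0 (fun l hl => (List.mem_filter.mp hl).2)]
  rw [pvRender_filter]
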